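-- pv_equiv track=rewrite | github.com/HazemKhairat/LeetCode | 1925-count-square-sum-triples/1925-count-square-sum-triples.py | countTriples
-- ===== SOURCE A (Python) =====
-- def countTriples(n: int) -> int:
--     ans =  0
--     k = set([i * i for i in range(1, n + 1)])
--
--     for i in range(1, n + 1):
--         for j in range(1, n + 1):
--             if (j * j) + (i * i) in k:
--                 ans += 1
--     return ans
-- ===== SOURCE B (Python) =====
-- def countTriples(n: int) -> int:
--     # enumerate the hypotenuse c and the first leg a < c; the second leg is
--     # determined, so test whether c*c - a*a is a perfect square, maintaining
--     # its floor square root b as a monotonically decreasing pointer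
--     ans = 0
--     for c in range(1, n + 1):
--         t = c * c
--         b = c
--         for a in range(1, c):
--             r = t - a * a
--             while b * b > r:
--                 b -= 1
--             if b * b == r:
--                 ans += 1
--     return ans
-- ===== Notes on version B (the rewrite author's own statement) =====
-- stated objective: alternative
-- what changed: Instead of precomputing the set of squares and testing every ordered pair (i,j) for membership, B enumerates the hypotenuse c and one leg a < c and checks that c*c - a*a is a perfect square with a monotone decreasing pointer (a hand-rolled integer-sqrt two-pointer), so the set and the membership test disappear.
import Mathlib
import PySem

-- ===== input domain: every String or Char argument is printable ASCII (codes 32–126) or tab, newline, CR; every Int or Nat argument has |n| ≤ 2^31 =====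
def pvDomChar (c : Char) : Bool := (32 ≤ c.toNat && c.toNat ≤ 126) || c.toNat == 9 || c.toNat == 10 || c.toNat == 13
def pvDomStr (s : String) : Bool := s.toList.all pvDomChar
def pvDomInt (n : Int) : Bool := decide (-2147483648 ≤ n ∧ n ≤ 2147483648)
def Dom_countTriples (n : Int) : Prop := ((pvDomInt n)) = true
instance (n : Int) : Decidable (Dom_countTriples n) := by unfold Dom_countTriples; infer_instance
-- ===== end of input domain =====

-- B enumerates the hypotenuse c and a leg a < c with a decreasing floor-sqrt pointer
-- instead of A's square-set membership test over all ordered pairs (alternative algorithm).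


-- ===== PORT A =====
def countTriples (n : Int) : Int :=
  let k : PySem.Set Int := PySem.Set.ofList ((PySem.List.pyRange 1 (n + 1) 1).map (fun i => i * i))
  (PySem.List.pyRange 1 (n + 1) 1).foldl (fun ans i =>
    (PySem.List.pyRange 1 (n + 1) 1).foldl (fun ans j =>
      if PySem.Set.contains k (j * j + i * i) then ans + 1 else ans) ans) 0

-- ===== PORT B =====
-- 'while b * b > r: b -= 1'.  The '0 < b' conjunct only makes the recursion total:
-- in every call B makes, r ≥ 1, so the condition change is never reached (at b = 0
-- the Python loop test 'b * b > r' is already false there).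
def dropWhileGt (r b : Int) : Int :=
  if h : 0 < b ∧ r < b * b then dropWhileGt r (b - 1) else b
termination_by b.toNat
decreasing_by omega

def countTriples_alt (n : Int) : Int :=
  (PySem.List.pyRange 1 (n + 1) 1).foldl (fun ans c =>
    let t := c * c
    ((PySem.List.pyRange 1 c 1).foldl (fun (s : Int × Int) a =>
      let r := t - a * a
      let b := dropWhileGt r s.2
      if b * b == r then (s.1 + 1, b) else (s.1, b)) (ans, c)).1) 0

-- ===== PRECONDITION & SPEC =====
def Spec_countTriples (n : Int) (out : Int) : Prop := out = countTriples_alt n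
instance (n : Int) (out : Int) : Decidable (Spec_countTriples n out) := by unfold Spec_countTriples; infer_instance

-- ===== CLAIM (what is proved, stated in full; the proofs are below) =====
def Claim_equal_countTriples : Prop := ∀ (n : Int), Dom_countTriples n → Spec_countTriples n (countTriples n)

-- ===== LEMMAS AND PROOFS =====

-- basic facts about Int.sqrt on nonnegative arguments
theorem int_sqrt_le (r : Int) (hr : 0 ≤ r) : Int.sqrt r * Int.sqrt r ≤ r := by
  have h := Nat.sqrt_le r.toNat
  have h2 : ((Nat.sqrt r.toNat * Nat.sqrt r.toNat : Nat) : Int) ≤ ((r.toNat : Nat) : Int) := by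
    exact_mod_cast h
  rw [Int.toNat_of_nonneg hr] at h2
  simpa [Int.sqrt] using h2

theorem int_le_sqrt (r b : Int) (hb : 0 ≤ b) (h : b * b ≤ r) : b ≤ Int.sqrt r := by
  have hr : 0 ≤ r := le_trans (mul_nonneg hb hb) h
  obtain ⟨s, rfl⟩ : ∃ s : Nat, b = (s : Int) := ⟨b.toNat, (Int.toNat_of_nonneg hb).symm⟩
  have h1 : s * s ≤ r.toNat := by
    have : ((s * s : Nat) : Int) ≤ r := by push_cast; exact h
    omega
  have h2 : s ≤ Nat.sqrt r.toNat := Nat.le_sqrt.mpr h1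
  simpa [Int.sqrt] using (by exact_mod_cast h2 : (s : Int) ≤ (Nat.sqrt r.toNat : Int))

theorem int_sqrt_mono {x y : Int} (h : x ≤ y) : Int.sqrt x ≤ Int.sqrt y := by
  have : Nat.sqrt x.toNat ≤ Nat.sqrt y.toNat := Nat.sqrt_le_sqrt (by omega)
  simpa [Int.sqrt] using
    (by exact_mod_cast this : ((Nat.sqrt x.toNat : Nat) : Int) ≤ ((Nat.sqrt y.toNat : Nat) : Int))

-- the while loop computes the floor square root when started at or above it
theorem dropWhileGt_eq_sqrt (r : Int) (hr : 0 ≤ r) :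
    ∀ b : Int, Int.sqrt r ≤ b → dropWhileGt r b = Int.sqrt r := by
  have key : ∀ m : Nat, ∀ b : Int, b.toNat = m → Int.sqrt r ≤ b → dropWhileGt r b = Int.sqrt r := by
    intro m
    induction m using Nat.strong_induction_on with
    | _ m ih =>
      intro b hm hb
      rw [dropWhileGt]
      split
      · rename_i h
        refine ih (b - 1).toNat (by omega) (b - 1) rfl ?_
        have h1 := int_sqrt_le r hr
        rcases lt_or_eq_of_le hb with h2 | h2
        · omega
        · exfalso; rw [h2] at h1; exact absurd h1 (not_le.mpr h.2)
      · rename_i h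
        by_cases hb0 : 0 < b
        · have hbb : b * b ≤ r := by
            by_contra hc
            exact h ⟨hb0, by omega⟩
          have := int_le_sqrt r b (le_of_lt hb0) hbb
          omega
        · have := Int.sqrt_nonneg r
          omega
  intro b hb
  exact key b.toNat b rfl hb

-- bridges: a sum / a 0-1 count over pyRange a b 1 is a Finset sum over Icc a (b-1)
theorem sum_map_pyRange (g : Int → Int) (a b : Int) :
    ((PySem.List.pyRange a b 1).map g).sum = ∑ x ∈ Finset.Icc a (b - 1), g x := by
  generalize hm : (b - a).toNat = m
  induction m generalizing a with
  | zero =>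
    rw [PySem.List.pyRange_one_eq_nil (by omega), Finset.Icc_eq_empty (by omega)]
    simp
  | succ k ih =>
    rw [PySem.List.pyRange_one_cons (by omega)]
    rw [List.map_cons, List.sum_cons, ih (a + 1) (by omega)]
    have hins : Finset.Icc a (b - 1) = insert a (Finset.Icc (a + 1) (b - 1)) := by
      ext x; simp [Finset.mem_Icc, Finset.mem_insert]; omega
    rw [hins, Finset.sum_insert (by simp)]

theorem countP_pyRange (p : Int → Bool) (a b : Int) :
    (((PySem.List.pyRange a b 1).countP p : Nat) : Int)
      = ∑ x ∈ Finset.Icc a (b - 1), (if p x then (1 : Int) else 0) := by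
  generalize hm : (b - a).toNat = m
  induction m generalizing a with
  | zero =>
    rw [PySem.List.pyRange_one_eq_nil (by omega), Finset.Icc_eq_empty (by omega)]
    simp
  | succ k ih =>
    rw [PySem.List.pyRange_one_cons (by omega), List.countP_cons]
    have hins : Finset.Icc a (b - 1) = insert a (Finset.Icc (a + 1) (b - 1)) := by
      ext x; simp [Finset.mem_Icc, Finset.mem_insert]; omega
    rw [hins, Finset.sum_insert (by simp), ← ih (a + 1) (by omega)]
    by_cases hp : p a
    · simp only [hp, if_pos]
      push_cast
      ring
    · simp [hp]

-- A's membership test, characterised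
theorem containsSq (n x : Int) :
    (PySem.Set.contains (PySem.Set.ofList ((PySem.List.pyRange 1 (n + 1) 1).map (fun i => i * i))) x = true)
      ↔ x ∈ (Finset.Icc 1 n).image (fun kk => kk * kk) := by
  rw [PySem.Set.contains_iff, PySem.Set.mem_ofList]
  simp [List.mem_map, PySem.List.mem_pyRange_one, Finset.mem_image, Finset.mem_Icc]

-- A's value as a double Finset sum
theorem countTriples_eq_sum (n : Int) :
    countTriples n = ∑ i ∈ Finset.Icc 1 n, ∑ j ∈ Finset.Icc 1 n,
      (if j * j + i * i ∈ (Finset.Icc 1 n).image (fun kk => kk * kk) then (1 : Int) else 0) := by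
  have h0 : countTriples n = (PySem.List.pyRange 1 (n + 1) 1).foldl (fun ans i =>
      (PySem.List.pyRange 1 (n + 1) 1).foldl (fun ans j =>
        if PySem.Set.contains (PySem.Set.ofList ((PySem.List.pyRange 1 (n + 1) 1).map (fun i => i * i)))
            (j * j + i * i) then ans + 1 else ans) ans) 0 := rfl
  rw [h0]
  simp only [PySem.List.foldl_if_add_one]
  rw [PySem.List.foldl_add (g := fun i => (((PySem.List.pyRange 1 (n + 1) 1).countP
        (fun j => PySem.Set.contains
          (PySem.Set.ofList ((PySem.List.pyRange 1 (n + 1) 1).map (fun i => i * i)))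
          (j * j + i * i)) : Nat) : Int))]
  rw [sum_map_pyRange, zero_add]
  have hn : n + 1 - 1 = n := by ring
  rw [hn]
  refine Finset.sum_congr rfl ?_
  intro i hi
  rw [countP_pyRange, hn]
  refine Finset.sum_congr rfl ?_
  intro j hj
  congr 1
  simp only [eq_iff_iff]
  rw [← containsSq n (j * j + i * i)]

-- B's inner loop: the pointer stays at the floor square root, and the count accumulates
theorem innerB (c : Int) (hc : 1 ≤ c) :
    ∀ a : Int, 1 ≤ a → ∀ ans b : Int, Int.sqrt (c * c - a * a) ≤ b →
      ((PySem.List.pyRange a c 1).foldl (fun (s : Int × Int) x =>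
          let r := c * c - x * x
          let b := dropWhileGt r s.2
          if b * b == r then (s.1 + 1, b) else (s.1, b)) (ans, b)).1
        = ans + (((PySem.List.pyRange a c 1).countP
            (fun x => Int.sqrt (c * c - x * x) * Int.sqrt (c * c - x * x) == c * c - x * x) : Nat) : Int) := by
  intro a
  generalize hm : (c - a).toNat = m
  induction m generalizing a with
  | zero =>
    intro ha ans b hb
    rw [PySem.List.pyRange_one_eq_nil (by omega)]
    simp
  | succ k ih =>
    intro ha ans b hb
    have hac : a < c := by omega
    have hr0 : (0 : Int) ≤ c * c - a * a := by nlinarith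
    rw [PySem.List.pyRange_one_cons (by omega)]
    simp only [List.foldl_cons, List.countP_cons]
    rw [dropWhileGt_eq_sqrt _ hr0 _ hb]
    have hmono : Int.sqrt (c * c - (a + 1) * (a + 1)) ≤ Int.sqrt (c * c - a * a) :=
      int_sqrt_mono (by nlinarith)
    by_cases hsq : Int.sqrt (c * c - a * a) * Int.sqrt (c * c - a * a) = c * c - a * a
    · simp only [hsq, beq_self_eq_true, if_pos]
      rw [ih (a + 1) (by omega) (by omega) (ans + 1) _ hmono]
      push_cast
      ring
    · rw [if_neg (by simpa using hsq)]
      rw [ih (a + 1) (by omega) (by omega) ans _ hmono]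
      simp [hsq]

-- B's value as a double Finset sum
theorem countTriples_alt_eq_sum (n : Int) :
    countTriples_alt n = ∑ c ∈ Finset.Icc 1 n, ∑ a ∈ Finset.Icc 1 (c - 1),
      (if Int.sqrt (c * c - a * a) * Int.sqrt (c * c - a * a) = c * c - a * a then (1 : Int) else 0) := by
  have h0 : countTriples_alt n = (PySem.List.pyRange 1 (n + 1) 1).foldl (fun ans c =>
      ((PySem.List.pyRange 1 c 1).foldl (fun (s : Int × Int) x =>
        let r := c * c - x * x
        let b := dropWhileGt r s.2
        if b * b == r then (s.1 + 1, b) else (s.1, b)) (ans, c)).1) 0 := rfl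
  rw [h0]
  have hcongr : ∀ (acc : Int), ∀ x ∈ PySem.List.pyRange 1 (n + 1) 1,
      ((PySem.List.pyRange 1 x 1).foldl (fun (s : Int × Int) y =>
        let r := x * x - y * y
        let b := dropWhileGt r s.2
        if b * b == r then (s.1 + 1, b) else (s.1, b)) (acc, x)).1
      = acc + (((PySem.List.pyRange 1 x 1).countP
        (fun y => Int.sqrt (x * x - y * y) * Int.sqrt (x * x - y * y) == x * x - y * y) : Nat) : Int) := by
    intro acc x hx
    rw [PySem.List.mem_pyRange_one] at hx
    refine innerB x hx.1 1 le_rfl acc x ?_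
    have h1 : Int.sqrt (x * x) = x := by
      rw [Int.sqrt_eq]; exact Int.natAbs_of_nonneg (by omega)
    calc Int.sqrt (x * x - 1 * 1) ≤ Int.sqrt (x * x) := int_sqrt_mono (by nlinarith)
      _ = x := h1
  rw [PySem.List.foldl_congr_mem _ _
      (fun ans c => ans + (((PySem.List.pyRange 1 c 1).countP
        (fun x => Int.sqrt (c * c - x * x) * Int.sqrt (c * c - x * x) == c * c - x * x) : Nat) : Int))
      0 hcongr]
  rw [PySem.List.foldl_add (g := fun c => (((PySem.List.pyRange 1 c 1).countP
        (fun x => Int.sqrt (c * c - x * x) * Int.sqrt (c * c - x * x) == c * c - x * x) : Nat) : Int))]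
  rw [sum_map_pyRange, zero_add]
  have hn : n + 1 - 1 = n := by ring
  rw [hn]
  refine Finset.sum_congr rfl ?_
  intro c hc
  rw [countP_pyRange]
  refine Finset.sum_congr rfl ?_
  intro a ha
  simp [beq_iff_eq]

-- the counting bijection (i, j) ↦ (sqrt (i² + j²), i)
theorem sum_bijection (n : Int) :
    (∑ i ∈ Finset.Icc 1 n, ∑ j ∈ Finset.Icc 1 n,
      (if j * j + i * i ∈ (Finset.Icc 1 n).image (fun kk => kk * kk) then (1 : Int) else 0))
    = ∑ c ∈ Finset.Icc 1 n, ∑ a ∈ Finset.Icc 1 (c - 1),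
      (if Int.sqrt (c * c - a * a) * Int.sqrt (c * c - a * a) = c * c - a * a then (1 : Int) else 0) := by
  -- embed the inner a-range into Icc 1 n with an explicit guard
  have hinner : ∀ c ∈ Finset.Icc 1 n,
      (∑ a ∈ Finset.Icc 1 (c - 1),
        (if Int.sqrt (c * c - a * a) * Int.sqrt (c * c - a * a) = c * c - a * a then (1 : Int) else 0))
      = ∑ a ∈ Finset.Icc 1 n,
        (if a < c ∧ Int.sqrt (c * c - a * a) * Int.sqrt (c * c - a * a) = c * c - a * a then (1 : Int) else 0) := by
    intro c hc
    rw [Finset.mem_Icc] at hc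
    rw [Finset.sum_congr rfl (g := fun a =>
        (if a < c ∧ Int.sqrt (c * c - a * a) * Int.sqrt (c * c - a * a) = c * c - a * a then (1 : Int) else 0))
      (by intro a ha
          rw [Finset.mem_Icc] at ha
          have : a < c := by omega
          by_cases h : Int.sqrt (c * c - a * a) * Int.sqrt (c * c - a * a) = c * c - a * a <;>
            simp [h, this])]
    refine Finset.sum_subset ?_ ?_
    · intro a ha; rw [Finset.mem_Icc] at *; omega
    · intro a ha hna
      rw [Finset.mem_Icc] at ha; rw [Finset.mem_Icc] at hna
      have : ¬ a < c := by omega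
      simp [this]
  rw [Finset.sum_congr rfl hinner]
  -- both sides become cards of filtered subsets of the same product set
  rw [← Finset.sum_product', ← Finset.sum_product']
  rw [Finset.sum_boole, Finset.sum_boole]
  congr 1
  refine Finset.card_bij'
    (fun p _ => (Int.sqrt (p.2 * p.2 + p.1 * p.1), p.1))
    (fun q _ => (q.2, Int.sqrt (q.1 * q.1 - q.2 * q.2))) ?_ ?_ ?_ ?_
  · -- forward maps into the (c, a) set
    intro p hp
    simp only [Finset.mem_filter, Finset.mem_product, Finset.mem_Icc, Finset.mem_image] at hp ⊢
    obtain ⟨⟨⟨hi1, hi2⟩, ⟨hj1, hj2⟩⟩, kk, hkk, hkke⟩ := hp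
    have hs : Int.sqrt (p.2 * p.2 + p.1 * p.1) = kk := by
      rw [← hkke, Int.sqrt_eq]; exact Int.natAbs_of_nonneg (by omega)
    rw [hs]
    have hlt : p.1 < kk := by nlinarith
    refine ⟨⟨⟨hkk.1, hkk.2⟩, ⟨hi1, hi2⟩⟩, hlt, ?_⟩
    have h2 : kk * kk - p.1 * p.1 = p.2 * p.2 := by omega
    rw [h2, Int.sqrt_eq]
    have h3 : ((p.2.natAbs : Int)) = p.2 := Int.natAbs_of_nonneg (by omega)
    rw [h3]
  · -- backward maps into the (i, j) set
    intro q hq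
    simp only [Finset.mem_filter, Finset.mem_product, Finset.mem_Icc, Finset.mem_image] at hq ⊢
    obtain ⟨⟨⟨hc1, hc2⟩, ⟨ha1, ha2⟩⟩, hlt, hsq⟩ := hq
    set b := Int.sqrt (q.1 * q.1 - q.2 * q.2) with hbdef
    have hr : 0 < q.1 * q.1 - q.2 * q.2 := by nlinarith
    have hb0 : 0 ≤ b := Int.sqrt_nonneg _
    have hb1 : 1 ≤ b := by
      rcases eq_or_lt_of_le hb0 with h | h
      · exfalso; rw [← h] at hsq; omega
      · omega
    have hbc : b < q.1 := by nlinarith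
    refine ⟨⟨⟨ha1, ha2⟩, hb1, by omega⟩, q.1, ⟨hc1, hc2⟩, by omega⟩
  · -- left inverse
    intro p hp
    simp only [Finset.mem_filter, Finset.mem_product, Finset.mem_Icc, Finset.mem_image] at hp
    obtain ⟨⟨⟨hi1, hi2⟩, ⟨hj1, hj2⟩⟩, kk, hkk, hkke⟩ := hp
    have hs : Int.sqrt (p.2 * p.2 + p.1 * p.1) = kk := by
      rw [← hkke, Int.sqrt_eq]; exact Int.natAbs_of_nonneg (by omega)
    have h2 : kk * kk - p.1 * p.1 = p.2 * p.2 := by omega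
    simp only [hs, h2, Int.sqrt_eq]
    have h3 : ((p.2.natAbs : Int)) = p.2 := Int.natAbs_of_nonneg (by omega)
    rw [h3]
  · -- right inverse
    intro q hq
    simp only [Finset.mem_filter, Finset.mem_product, Finset.mem_Icc] at hq
    obtain ⟨⟨⟨hc1, hc2⟩, ⟨ha1, ha2⟩⟩, hlt, hsq⟩ := hq
    have h2 : Int.sqrt (q.1 * q.1 - q.2 * q.2) * Int.sqrt (q.1 * q.1 - q.2 * q.2) + q.2 * q.2 = q.1 * q.1 := by
      omega
    simp only [h2, Int.sqrt_eq]
    have h3 : ((q.1.natAbs : Int)) = q.1 := Int.natAbs_of_nonneg (by omega)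
    rw [h3]

-- ===== VERDICT (by name: the statement is the Claim_ definition above) =====
theorem countTriples_spec : Claim_equal_countTriples := by
  intro n _
  unfold Spec_countTriples
  rw [countTriples_eq_sum, countTriples_alt_eq_sum, sum_bijection]
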